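-- pv_equiv track=rewrite | github.com/yckumich/diagnostic | utils/tests_summary_utils/utils.py | get_merge_span
-- ===== SOURCE A (Python) =====
-- def get_merge_span(item_list):
--     merge_indices = []
--     curr_val, start_idx, end_idx = item_list[0], 1, 1
--
--     for val in item_list[1:]:
--         if val == curr_val:
--             end_idx += 1
--         else:
--             curr_val = val
--             merge_indices.append([start_idx, end_idx])
--             start_idx = end_idx + 1
--             end_idx += 1
--
--     merge_indices.append([start_idx, end_idx])
--     return merge_indices
-- ===== SOURCE B (Python) =====
-- def get_merge_span(item_list):
--     n = len(item_list)
--     # stage 1: 0-based cut positions where the value changes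
--     cuts = [0] + [i for i in range(1, n) if item_list[i] != item_list[i - 1]] + [n]
--     # stage 2: pair adjacent cuts into inclusive 1-based spans
--     return [[a + 1, b] for a, b in zip(cuts, cuts[1:])]
-- ===== Notes on version B (the rewrite author's own statement) =====
-- stated objective: alternative
-- what changed: B is a staged two-pass algorithm: it first computes the list of 0-based change-point indices (cuts) by comparing each element with its predecessor, then pairs adjacent cuts with zip into inclusive 1-based spans, instead of A's single pass that tracks curr_val/start_idx/end_idx and appends spans as it goes.
import Mathlib
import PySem

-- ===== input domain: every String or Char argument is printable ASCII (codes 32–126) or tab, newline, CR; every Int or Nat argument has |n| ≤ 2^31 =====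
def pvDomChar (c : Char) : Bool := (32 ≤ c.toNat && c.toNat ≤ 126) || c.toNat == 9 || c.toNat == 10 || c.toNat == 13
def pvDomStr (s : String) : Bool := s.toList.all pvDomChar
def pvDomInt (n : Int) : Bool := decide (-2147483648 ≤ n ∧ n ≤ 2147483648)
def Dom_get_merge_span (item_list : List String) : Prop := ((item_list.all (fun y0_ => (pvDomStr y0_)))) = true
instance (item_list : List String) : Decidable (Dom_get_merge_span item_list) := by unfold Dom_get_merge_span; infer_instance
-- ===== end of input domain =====

-- B computes change-point cut indices in one pass and then pairs adjacent cuts into spans in a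
-- second pass (a staged two-pass decomposition), instead of A's single stateful loop; same O(n) cost.


-- ===== PORT A =====
-- loop over item_list[1:] with state (curr_val, start_idx, end_idx, merge_indices)
def getMergeSpanGoA (curr : String) (s e : Int) (acc : List (List Int)) :
    List String → List (List Int)
  | [] => acc ++ [[s, e]]
  | v :: rest =>
    if v = curr then getMergeSpanGoA curr s (e + 1) acc rest
    else getMergeSpanGoA v (e + 1) (e + 1) (acc ++ [[s, e]]) rest

def get_merge_span (item_list : List String) : List (List Int) :=
  match item_list with
  | [] => []          -- Python A raises IndexError here; excluded by Pre_get_merge_span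
  | h :: t => getMergeSpanGoA h 1 1 [] t

-- ===== PORT B =====
-- stage 1: cuts = [0] + [i for i in range(1, n) if item_list[i] != item_list[i-1]] + [n]
-- stage 2: [[a + 1, b] for a, b in zip(cuts, cuts[1:])]
def get_merge_span_alt (item_list : List String) : List (List Int) :=
  let n : Int := item_list.length
  let cuts : List Int :=
    0 :: (PySem.List.pyRange 1 n 1).filter
      (fun i => decide (PySem.List.pyGet? item_list i ≠ PySem.List.pyGet? item_list (i - 1)))
      ++ [n]
  (cuts.zip (cuts.drop 1)).map (fun p => [p.1 + 1, p.2])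

-- ===== PRECONDITION & SPEC =====
-- Pre_ excludes only the empty list, on which Python A raises IndexError (item_list[0]).
def Pre_get_merge_span (item_list : List String) : Prop := item_list ≠ []
instance (item_list : List String) : Decidable (Pre_get_merge_span item_list) := by
  unfold Pre_get_merge_span; infer_instance

def pvWitness_get_merge_span : List String := ["a", "a", "b"]

def Spec_get_merge_span (item_list : List String) (out : List (List Int)) : Prop :=
  out = get_merge_span_alt item_list
instance (item_list : List String) (out : List (List Int)) : Decidable (Spec_get_merge_span item_list out) := by
  unfold Spec_get_merge_span; infer_instance

-- ===== CLAIM =====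
def Claim_equal_get_merge_span : Prop := ∀ (item_list : List String), Dom_get_merge_span item_list → Pre_get_merge_span item_list → Spec_get_merge_span item_list (get_merge_span item_list)

-- ===== LEMMAS AND PROOFS =====
-- adjacent-pair spans of a cut list (the shape of B's stage 2)
def pvSpans (cuts : List Int) : List (List Int) :=
  (cuts.zip (cuts.drop 1)).map (fun p => [p.1 + 1, p.2])

theorem pvSpans_cons_cons (a b : Int) (cs : List Int) :
    pvSpans (a :: b :: cs) = [a + 1, b] :: pvSpans (b :: cs) := by
  simp [pvSpans]

-- the change-point cuts of curr :: t, where curr sits at 0-based index e - 1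
def pvBnd (e : Nat) (curr : String) : List String → List Int
  | [] => []
  | v :: t => if v = curr then pvBnd (e + 1) v t else (e : Int) :: pvBnd (e + 1) v t

-- A's loop produces exactly the adjacent-pair spans of the cut list
theorem getMergeSpanGoA_eq (t : List String) :
    ∀ (curr : String) (s : Int) (e : Nat) (acc : List (List Int)),
      getMergeSpanGoA curr s (e : Int) acc t =
        acc ++ pvSpans ((s - 1) :: pvBnd e curr t ++ [(e : Int) + t.length]) := by
  induction t with
  | nil =>
    intro curr s e acc
    simp [getMergeSpanGoA, pvBnd, pvSpans]
  | cons v t ih =>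
    intro curr s e acc
    by_cases h : v = curr
    · subst h
      show (if v = v then getMergeSpanGoA v s ((e : Int) + 1) acc t else _) = _
      rw [if_pos rfl]
      have h1 : (e : Int) + 1 = ((e + 1 : Nat) : Int) := by push_cast; ring
      rw [h1, ih]
      simp [pvBnd]
      ring_nf
    · show (if v = curr then _ else
          getMergeSpanGoA v ((e : Int) + 1) ((e : Int) + 1) (acc ++ [[s, (e : Int)]]) t) = _
      rw [if_neg h]
      have h1 : (e : Int) + 1 = ((e + 1 : Nat) : Int) := by push_cast; ring
      rw [h1]
      rw [ih v (((e + 1 : Nat) : Int)) (e + 1) (acc ++ [[s, (e : Int)]])]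
      have h2 : pvBnd e curr (v :: t) = (e : Int) :: pvBnd (e + 1) v t := by
        simp [pvBnd, h]
      rw [h2]
      rw [show ((s - 1) :: (((e : Nat) : Int) :: pvBnd (e + 1) v t) ++ [(e : Int) + ((v :: t).length : Int)])
          = (s - 1) :: ((e : Nat) : Int) :: (pvBnd (e + 1) v t ++ [(e : Int) + ((v :: t).length : Int)]) from by simp]
      rw [pvSpans_cons_cons]
      have e1 : ((e + 1 : Nat) : Int) - 1 = (e : Int) := by push_cast; ring
      have e2 : ((e + 1 : Nat) : Int) + (t.length : Int)
          = (e : Int) + ((v :: t).length : Int) := by push_cast; simp; ring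
      have e3 : s - 1 + 1 = s := by ring
      rw [e1, e2, e3]
      simp

-- B's stage-1 filter computes exactly the change-point cuts
theorem pvFilter_eq_bnd (t : List String) :
    ∀ (pre : List String) (curr : String),
      (PySem.List.pyRange ((pre.length : Int) + 1)
          (((pre ++ curr :: t).length : Int)) 1).filter
        (fun i => decide (PySem.List.pyGet? (pre ++ curr :: t) i ≠
                          PySem.List.pyGet? (pre ++ curr :: t) (i - 1))) =
      pvBnd (pre.length + 1) curr t := by
  induction t with
  | nil =>
    intro pre curr
    rw [PySem.List.pyRange_one_eq_nil (by simp)]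
    simp [pvBnd]
  | cons v t ih =>
    intro pre curr
    have hlen : (((pre ++ curr :: v :: t).length : Nat) : Int)
        = (pre.length : Int) + 2 + t.length := by
      simp; ring
    rw [PySem.List.pyRange_one_cons (by rw [hlen]; omega)]
    rw [List.filter_cons]
    have hget1 : PySem.List.pyGet? (pre ++ curr :: v :: t) ((pre.length : Int) + 1 - 1)
        = some curr := by
      have hi : (pre.length : Int) + 1 - 1 = (pre.length : Int) := by ring
      rw [hi]
      exact PySem.List.pyGet?_append_length pre _ curr
    have hget2 : PySem.List.pyGet? (pre ++ curr :: v :: t) ((pre.length : Int) + 1)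
        = some v := by
      have hsplit : pre ++ curr :: v :: t = (pre ++ [curr]) ++ v :: t := by simp
      have hl : ((pre.length : Int) + 1) = (((pre ++ [curr]).length : Nat) : Int) := by simp
      rw [hsplit, hl]
      exact PySem.List.pyGet?_append_length (pre ++ [curr]) _ v
    have hrec := ih (pre ++ [curr]) v
    have hpl : (((pre ++ [curr]).length : Nat) : Int) = (pre.length : Int) + 1 := by simp
    have hpl2 : (pre ++ [curr]).length = pre.length + 1 := by simp
    have hlist : (pre ++ [curr]) ++ v :: t = pre ++ curr :: v :: t := by simp
    rw [hpl, hpl2, hlist] at hrec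
    have hbody : decide (PySem.List.pyGet? (pre ++ curr :: v :: t) ((pre.length : Int) + 1) ≠
        PySem.List.pyGet? (pre ++ curr :: v :: t) ((pre.length : Int) + 1 - 1))
        = decide (v ≠ curr) := by
      simp only [hget1, hget2]
      by_cases h : v = curr <;> simp [h]
    rw [hbody]
    have hbnd : pvBnd (pre.length + 1) curr (v :: t)
        = if v = curr then pvBnd (pre.length + 1 + 1) v t
          else ((pre.length + 1 : Nat) : Int) :: pvBnd (pre.length + 1 + 1) v t := by
      simp [pvBnd]
    by_cases h : v = curr
    · rw [if_neg (by simp [h]), hrec, hbnd, if_pos h]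
    · rw [if_pos (by simp [h]), hrec, hbnd, if_neg h]
      congr 1

-- ===== VERDICT =====
theorem get_merge_span_spec : Claim_equal_get_merge_span := by
  intro item_list _ hpre
  unfold Spec_get_merge_span
  match item_list with
  | [] => exact absurd rfl hpre
  | h :: t =>
    show getMergeSpanGoA h 1 1 [] t = get_merge_span_alt (h :: t)
    have hA := getMergeSpanGoA_eq t h 1 1 []
    have hB : (PySem.List.pyRange 1 (((h :: t).length : Nat) : Int) 1).filter
        (fun i => decide (PySem.List.pyGet? (h :: t) i ≠
                          PySem.List.pyGet? (h :: t) (i - 1))) = pvBnd 1 h t :=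
      pvFilter_eq_bnd t [] h
    have halt : get_merge_span_alt (h :: t)
        = pvSpans (0 :: (PySem.List.pyRange 1 (((h :: t).length : Nat) : Int) 1).filter
            (fun i => decide (PySem.List.pyGet? (h :: t) i ≠
                              PySem.List.pyGet? (h :: t) (i - 1)))
            ++ [(((h :: t).length : Nat) : Int)]) := rfl
    simp only [Nat.cast_one] at hA
    rw [hA, halt, hB]
    simp only [List.nil_append]
    have e1 : (1 : Int) - 1 = 0 := by norm_num
    have e2 : (1 : Int) + (t.length : Int) = (((h :: t).length : Nat) : Int) := by
      simp; ring
    rw [e1, e2]
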